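-- pv_equiv track=rewrite | github.com/polotto/HackerRank | 2D-array-ds/__init__.py | mult_sum
-- ===== SOURCE A (Python) =====
-- def mult_sum(a, b):
--     res = []
--     for i in range(len(a)):
--         row = []
--         for j in range(len(a)):
--             row.append(a[i][j]*b[i][j])
--         res.append(row)
--
--     sum = 0
--     for i in range(len(res)):
--         for j in range(len(res)):
--             if res[i][j] == 0:
--                 continue
--             else:
--                 sum = sum + res[i][j]
--
--     return sum
-- ===== SOURCE B (Python) =====
-- def mult_sum(a, b):
--     n = len(a)
--     return sum(a[i][j] * b[i][j] for i in range(n) for j in range(n))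
-- ===== Notes on version B (the rewrite author's own statement) =====
-- stated objective: simpler
-- what changed: B drops the intermediate n-by-n product matrix and the zero-skip branch entirely, accumulating the sum of a[i][j]*b[i][j] in a single comprehension pass.
import Mathlib
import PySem

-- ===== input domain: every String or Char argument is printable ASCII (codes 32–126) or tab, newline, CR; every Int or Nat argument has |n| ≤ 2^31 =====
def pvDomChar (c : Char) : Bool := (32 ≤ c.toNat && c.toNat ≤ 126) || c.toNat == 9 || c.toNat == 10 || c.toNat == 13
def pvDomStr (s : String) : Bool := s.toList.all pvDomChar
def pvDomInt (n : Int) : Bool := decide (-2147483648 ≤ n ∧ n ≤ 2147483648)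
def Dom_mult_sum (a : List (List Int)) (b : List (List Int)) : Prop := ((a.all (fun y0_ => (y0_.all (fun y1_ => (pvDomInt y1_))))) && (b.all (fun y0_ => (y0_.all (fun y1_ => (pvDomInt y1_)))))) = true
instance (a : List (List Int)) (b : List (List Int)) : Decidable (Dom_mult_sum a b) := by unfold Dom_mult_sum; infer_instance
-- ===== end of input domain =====

-- B drops A's intermediate product matrix and zero-skip branch: one pass summing a[i][j]*b[i][j] (simpler).

-- ===== PORT A =====
-- m[i][j] via PySem indexing; exact wherever the indices are in range (guaranteed by Pre_)
def pvAt (m : List (List Int)) (i j : Int) : Int :=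
  PySem.List.pyGetD (PySem.List.pyGetD m i []) j 0

-- the first phase of A: build res by appending rows of appended products
def pvRes (a : List (List Int)) (b : List (List Int)) : List (List Int) :=
  (PySem.List.pyRange 0 (PySem.List.len a) 1).foldl (fun res i =>
    res ++ [(PySem.List.pyRange 0 (PySem.List.len a) 1).foldl (fun row j =>
      row ++ [pvAt a i j * pvAt b i j]) []]) []

def mult_sum (a : List (List Int)) (b : List (List Int)) : Int :=
  (PySem.List.pyRange 0 (PySem.List.len (pvRes a b)) 1).foldl (fun s i =>
    (PySem.List.pyRange 0 (PySem.List.len (pvRes a b)) 1).foldl (fun s j =>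
      if pvAt (pvRes a b) i j == 0 then s else s + pvAt (pvRes a b) i j) s) 0

-- ===== PORT B =====
def mult_sum_alt (a : List (List Int)) (b : List (List Int)) : Int :=
  ((PySem.List.pyRange 0 (PySem.List.len a) 1).flatMap (fun i =>
    (PySem.List.pyRange 0 (PySem.List.len a) 1).map (fun j =>
      pvAt a i j * pvAt b i j))).sum

-- ===== PRECONDITION & SPEC =====
-- Pre_: exactly the inputs where every access a[i][j], b[i][j] (i, j < len(a)) is in range;
-- on the excluded inputs the Python A raises IndexError.
def Pre_mult_sum (a : List (List Int)) (b : List (List Int)) : Prop :=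
  a.length ≤ b.length ∧ (∀ r ∈ a, a.length ≤ r.length) ∧
  (∀ r ∈ b.take a.length, a.length ≤ r.length)
instance (a : List (List Int)) (b : List (List Int)) : Decidable (Pre_mult_sum a b) := by
  unfold Pre_mult_sum; infer_instance

def pvWitness_mult_sum : List (List Int) × List (List Int) :=
  ([[1, 2], [3, 4]], [[5, 6], [7, 8]])

def Spec_mult_sum (a : List (List Int)) (b : List (List Int)) (out : Int) : Prop := out = mult_sum_alt a b
instance (a : List (List Int)) (b : List (List Int)) (out : Int) : Decidable (Spec_mult_sum a b out) := by unfold Spec_mult_sum; infer_instance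

-- ===== CLAIM (what is proved, stated in full; the proofs are below) =====
def Claim_equal_mult_sum : Prop := ∀ (a : List (List Int)) (b : List (List Int)), Dom_mult_sum a b → Pre_mult_sum a b → Spec_mult_sum a b (mult_sum a b)

-- ===== LEMMAS AND PROOFS =====

-- the zero-skip accumulation of A's second phase is plain addition
theorem pv_if_zero_add (s x : Int) : (if x == 0 then s else s + x) = s + x := by
  by_cases h : x = 0 <;> simp [h]

-- A's res matrix, built by appends over pyRange, is the comprehension matrix over List.range
theorem pv_res_eq (a b : List (List Int)) :
    pvRes a b = (List.range a.length).map (fun (k : Nat) =>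
      (List.range a.length).map (fun (l : Nat) =>
        pvAt a (k : Int) (l : Int) * pvAt b (k : Int) (l : Int))) := by
  simp only [pvRes, PySem.List.len_eq, PySem.List.pyRange_zero_natCast,
    List.foldl_map, PySem.List.foldl_append_singleton_eq_map, List.nil_append]

theorem pv_core (a b : List (List Int)) : mult_sum a b = mult_sum_alt a b := by
  unfold mult_sum mult_sum_alt
  rw [pv_res_eq]
  have hlen : PySem.List.len ((List.range a.length).map (fun (k : Nat) =>
      (List.range a.length).map (fun (l : Nat) =>
        pvAt a (k : Int) (l : Int) * pvAt b (k : Int) (l : Int)))) = PySem.List.len a := by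
    simp [PySem.List.len_eq]
  rw [hlen]
  have hL : PySem.List.len a = (a.length : Int) := by simp [PySem.List.len_eq]
  rw [hL, PySem.List.pyRange_zero_natCast]
  simp only [List.foldl_map, List.map_map, pv_if_zero_add, PySem.List.foldl_add]
  simp only [List.flatMap_def, List.map_map]
  rw [List.sum_flatten, List.map_map, zero_add]
  refine congrArg _ (List.map_congr_left ?_)
  intro k hk
  simp only [Function.comp_apply]
  refine congrArg _ (List.map_congr_left ?_)
  intro l hl
  have hk' := List.mem_range.mp hk
  have hl' := List.mem_range.mp hl
  simp only [pvAt, Function.comp_apply, PySem.List.pyGetD_natCast,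
    PySem.List.getD_map_range _ _ _ _ hk', PySem.List.getD_map_range _ _ _ _ hl']

-- ===== VERDICT (by name: the statement is the Claim_ definition above) =====
theorem mult_sum_spec : Claim_equal_mult_sum := by
  intro a b _ _
  exact pv_core a b
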